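-- pv_equiv track=rewrite | github.com/birdears/birdears | birdears.py | _append_octave_to_scale
-- ===== SOURCE A (Python) =====
-- def _append_octave_to_scale(scale, starting_octave, descending=None):
--     """Inserts scientific octave number to the notes on a the given scale.
--     """
--
--     next_octave = 1 if not descending else -1
--
--     scale_with_octave = []
--     changing_note = None
--
--     current_octave = starting_octave
--
--     if not descending:
--         for closest in ['C', 'C#', 'Db']:
--             if closest in scale:
--                 changing_note = closest
--                 break
--     else:
--         for closest in ['B', 'Bb', 'A#']:
--             if closest in scale:
--                 changing_note = closest
--                 break
--
--     for idx, note in enumerate(scale):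
--         if idx > 0 and note == changing_note:
--             current_octave += next_octave
--
--         scale_with_octave.append("{}{}".format(note, current_octave))
--
--     return scale_with_octave
-- ===== SOURCE B (Python) =====
-- def _append_octave_to_scale(scale, starting_octave, descending=None):
--     """Segment-based rewrite: split the scale into segments at each later
--     occurrence of the octave-changing note; segment k gets the constant
--     octave starting_octave + step*k."""
--     step = -1 if descending else 1
--
--     candidates = ['B', 'Bb', 'A#'] if descending else ['C', 'C#', 'Db']
--     changing_note = next((c for c in candidates if c in scale), None)
--
--     if not scale:
--         return []
--
--     segments = []
--     current = [scale[0]]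
--     for note in scale[1:]:
--         if note == changing_note:
--             segments.append(current)
--             current = [note]
--         else:
--             current.append(note)
--     segments.append(current)
--
--     out = []
--     for k, segment in enumerate(segments):
--         octave = starting_octave + step * k
--         for note in segment:
--             out.append("{}{}".format(note, octave))
--     return out
-- ===== Notes on version B (the rewrite author's own statement) =====
-- stated objective: alternative
-- what changed: A's single fused loop carrying a mutable running octave is replaced by a segmentation algorithm: the scale is split into segments at each later occurrence of the changing note, and segment k is formatted with the constant octave starting_octave + step*k (octave computed from segment index, no running accumulator).
import Mathlib
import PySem

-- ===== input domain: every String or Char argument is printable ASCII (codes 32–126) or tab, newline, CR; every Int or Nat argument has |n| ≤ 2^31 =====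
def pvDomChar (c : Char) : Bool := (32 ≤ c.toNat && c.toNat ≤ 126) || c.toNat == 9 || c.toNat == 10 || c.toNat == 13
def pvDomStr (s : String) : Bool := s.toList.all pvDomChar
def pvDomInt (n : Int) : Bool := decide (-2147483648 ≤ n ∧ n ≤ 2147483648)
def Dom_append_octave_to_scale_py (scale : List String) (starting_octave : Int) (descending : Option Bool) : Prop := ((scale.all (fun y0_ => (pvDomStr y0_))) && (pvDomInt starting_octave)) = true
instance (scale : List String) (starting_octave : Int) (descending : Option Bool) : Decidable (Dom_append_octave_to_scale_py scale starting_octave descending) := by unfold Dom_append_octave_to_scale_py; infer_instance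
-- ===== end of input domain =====

-- B replaces A's fused stateful loop by a segmentation algorithm: split the scale at each
-- later occurrence of the changing note, then format segment k with the constant octave
-- starting_octave + step*k; objective: alternative decomposition, not speed.

-- ===== PORT A =====
-- literal port of A: pick changing_note by scanning the candidate list,
-- then one fold carrying (current_octave, output-so-far)
def append_octave_to_scale_py (scale : List String) (starting_octave : Int) (descending : Option Bool) : List String :=
  let next_octave : Int := if descending ≠ some true then 1 else -1
  let changing_note : Option String :=
    if descending ≠ some true then
      List.find? (fun c => scale.contains c) ["C", "C#", "Db"]
    else
      List.find? (fun c => scale.contains c) ["B", "Bb", "A#"]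
  (((PySem.List.enumerate scale).foldl
    (fun (st : Int × List String) p =>
      let cur := if p.1 > 0 ∧ some p.2 = changing_note then st.1 + next_octave else st.1
      (cur, st.2 ++ [p.2 ++ PySem.Int.toStr cur]))
    (starting_octave, []))).2

-- ===== PORT B =====
-- B's segment-building loop (structural recursion over the tail of the scale,
-- carrying the completed segments and the segment under construction)
def pvBuildSegs (cn : Option String) : List (List String) → List String → List String → List (List String)
  | segs, cur, [] => segs ++ [cur]
  | segs, cur, n :: rest =>
    if some n = cn then pvBuildSegs cn (segs ++ [cur]) [n] rest
    else pvBuildSegs cn segs (cur ++ [n]) rest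

-- port of B (Source B): segment the scale at later occurrences of changing_note,
-- then format segment k with constant octave starting_octave + step*k
def append_octave_to_scale_py_alt (scale : List String) (starting_octave : Int) (descending : Option Bool) : List String :=
  let step : Int := if descending = some true then -1 else 1
  let candidates : List String := if descending = some true then ["B", "Bb", "A#"] else ["C", "C#", "Db"]
  let changing_note : Option String := List.find? (fun c => scale.contains c) candidates
  match scale with
  | [] => []
  | h :: t =>
    let segments := pvBuildSegs changing_note [] [h] t
    (PySem.List.enumerate segments).flatMap
      (fun p => p.2.map (fun n => n ++ PySem.Int.toStr (starting_octave + step * p.1)))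

-- ===== PRECONDITION & SPEC =====
def Spec_append_octave_to_scale_py (scale : List String) (starting_octave : Int) (descending : Option Bool) (out : List String) : Prop := out = append_octave_to_scale_py_alt scale starting_octave descending
instance (scale : List String) (starting_octave : Int) (descending : Option Bool) (out : List String) : Decidable (Spec_append_octave_to_scale_py scale starting_octave descending out) := by unfold Spec_append_octave_to_scale_py; infer_instance

-- ===== CLAIM (what is proved, stated in full; the proofs are below) =====
def Claim_equal_append_octave_to_scale_py : Prop := ∀ (scale : List String) (starting_octave : Int) (descending : Option Bool), Dom_append_octave_to_scale_py scale starting_octave descending → Spec_append_octave_to_scale_py scale starting_octave descending (append_octave_to_scale_py scale starting_octave descending)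

-- ===== LEMMAS AND PROOFS =====

-- common recursive characterisation of the tail of both programs' output
-- (absolute octave `cur` carried along)
def pvCoreA (cn : Option String) (no : Int) : Int → List String → List String
  | _, [] => []
  | cur, n :: rest =>
    let c := if some n = cn then cur + no else cur
    (n ++ PySem.Int.toStr c) :: pvCoreA cn no c rest

lemma pvLemA (cn : Option String) (no : Int) :
    ∀ (xs : List String) (k cur : Int) (acc : List String), 1 ≤ k →
    ((PySem.List.enumerate xs k).foldl
      (fun (st : Int × List String) p =>
        let cur := if p.1 > 0 ∧ some p.2 = cn then st.1 + no else st.1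
        (cur, st.2 ++ [p.2 ++ PySem.Int.toStr cur]))
      (cur, acc)).2 = acc ++ pvCoreA cn no cur xs := by
  intro xs
  induction xs with
  | nil => intro k cur acc hk; simp [pvCoreA, PySem.List.enumerate]
  | cons n rest ih =>
    intro k cur acc hk
    rw [PySem.List.enumerate_cons, List.foldl_cons]
    have hkpos : (0:Int) < k := by omega
    rw [ih (k+1) _ _ (by omega)]
    by_cases h : some n = cn <;> simp [pvCoreA, h, hkpos]

-- accumulated segments split off the front of pvBuildSegs
lemma pvBuildSegs_acc (cn : Option String) :
    ∀ (xs : List String) (segs : List (List String)) (cur : List String),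
    pvBuildSegs cn segs cur xs = segs ++ pvBuildSegs cn [] cur xs := by
  intro xs
  induction xs with
  | nil => intro segs cur; simp [pvBuildSegs]
  | cons n rest ih =>
    intro segs cur
    by_cases h : some n = cn
    · simp only [pvBuildSegs, if_pos h]
      rw [ih (segs ++ [cur]), ih ([] ++ [cur])]; simp
    · simp only [pvBuildSegs, if_neg h]
      exact ih segs (cur ++ [n])

-- tail of B's output, with octave written through its segment index
def pvTailFmt (cn : Option String) (step sb : Int) : Int → List String → List String
  | _, [] => []
  | k, n :: rest =>
    if some n = cn then (n ++ PySem.Int.toStr (sb + step * (k + 1))) :: pvTailFmt cn step sb (k + 1) rest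
    else (n ++ PySem.Int.toStr (sb + step * k)) :: pvTailFmt cn step sb k rest

lemma pvLemB (cn : Option String) (step sb : Int) :
    ∀ (xs : List String) (cur : List String) (k : Int),
    (PySem.List.enumerate (pvBuildSegs cn [] cur xs) k).flatMap
      (fun p => p.2.map (fun n => n ++ PySem.Int.toStr (sb + step * p.1)))
    = cur.map (fun n => n ++ PySem.Int.toStr (sb + step * k)) ++ pvTailFmt cn step sb k xs := by
  intro xs
  induction xs with
  | nil =>
    intro cur k
    simp [pvBuildSegs, PySem.List.enumerate, PySem.List.enumerate_cons, pvTailFmt]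
  | cons n rest ih =>
    intro cur k
    by_cases h : some n = cn
    · simp only [pvBuildSegs, if_pos h, List.nil_append]
      rw [pvBuildSegs_acc cn rest [cur] [n], List.cons_append, List.nil_append,
        PySem.List.enumerate_cons, List.flatMap_cons, ih [n] (k + 1)]
      simp [pvTailFmt, h]
    · simp only [pvBuildSegs, if_neg h]
      rw [ih (cur ++ [n]) k]
      simp [pvTailFmt, h]

-- the tail formats agree: segment-index octave = running absolute octave
lemma pvTailFmt_core (cn : Option String) (step sb : Int) :
    ∀ (xs : List String) (k : Int),
    pvTailFmt cn step sb k xs = pvCoreA cn step (sb + step * k) xs := by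
  intro xs
  induction xs with
  | nil => intro k; simp [pvTailFmt, pvCoreA]
  | cons n rest ih =>
    intro k
    by_cases h : some n = cn
    · have he : sb + step * (k + 1) = sb + step * k + step := by ring
      simp only [pvTailFmt, pvCoreA, if_pos h, ih (k + 1), he]
    · simp [pvTailFmt, pvCoreA, h, ih k]

-- both programs compute the same list for a fixed changing note and step
lemma pvMain (cn : Option String) (no sb : Int) (scale : List String) :
    (((PySem.List.enumerate scale).foldl
      (fun (st : Int × List String) p =>
        let cur := if p.1 > 0 ∧ some p.2 = cn then st.1 + no else st.1
        (cur, st.2 ++ [p.2 ++ PySem.Int.toStr cur]))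
      (sb, []))).2
    = (match scale with
      | [] => []
      | h :: t =>
        (PySem.List.enumerate (pvBuildSegs cn [] [h] t)).flatMap
          (fun p => p.2.map (fun n => n ++ PySem.Int.toStr (sb + no * p.1)))) := by
  cases scale with
  | nil => simp [PySem.List.enumerate]
  | cons h t =>
    rw [PySem.List.enumerate_cons, List.foldl_cons]
    have h0 : ¬ ((0:Int) > 0 ∧ some h = cn) := by rintro ⟨hlt, -⟩; omega
    norm_num [h0]
    rw [pvLemA cn no t 1 sb _ (by omega)]
    rw [pvLemB cn no sb t [h] 0, pvTailFmt_core]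
    simp

-- ===== VERDICT (by name: the statement is the Claim_ definition above) =====
theorem append_octave_to_scale_py_spec : Claim_equal_append_octave_to_scale_py := by
  intro scale sb descending _
  unfold Spec_append_octave_to_scale_py
  unfold append_octave_to_scale_py append_octave_to_scale_py_alt
  rcases descending with _ | b
  · exact pvMain _ 1 sb scale
  · cases b
    · exact pvMain _ 1 sb scale
    · exact pvMain _ (-1) sb scale
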